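-- pv_equiv track=rewrite | github.com/trents/advent-of-code-2020-py | day_10_a.py | gap_count
-- ===== SOURCE A (Python) =====
-- def gap_count(arr):
--     """Count the 1 and 3 gaps in arr, then return the product of them"""
--     one_count = 0
--     three_count = 1 # the gap between the last charger and the device
--     i = 0
--     if arr[0] == 1:
--        one_count += 1
--     elif arr[0] == 3:
--        three_count += 1
--     while i < len(arr) - 1:
--         if arr[i] + 1 == arr[i+1]:
--            one_count += 1
--         elif arr[i] + 3 == arr[i+1]:
--            three_count += 1
--         i += 1
--     return one_count * three_count
-- ===== SOURCE B (Python) =====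
-- def gap_count(arr):
--     """Count the 1 and 3 gaps in arr, then return the product of them"""
--     chain = [0] + arr + [arr[-1] + 3]
--     ones, threes = _gaps(chain, 0, len(chain) - 1)
--     return ones * threes
--
-- def _gaps(chain, lo, hi):
--     """(#1-gaps, #3-gaps) among adjacent pairs of chain[lo..hi], by divide and conquer."""
--     if hi - lo == 1:
--         d = chain[hi] - chain[lo]
--         return (1 if d == 1 else 0, 1 if d == 3 else 0)
--     if hi == lo:
--         return (0, 0)
--     mid = (lo + hi) // 2
--     o1, t1 = _gaps(chain, lo, mid)
--     o2, t2 = _gaps(chain, mid, hi)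
--     return (o1 + o2, t1 + t2)
-- ===== Notes on version B (the rewrite author's own statement) =====
-- stated objective: alternative
-- what changed: B builds the explicit chain (outlet 0, the adapters, last+3) and counts its 1- and 3-gaps by divide and conquer: the segment is split at the midpoint, the two halves' gap tallies are computed recursively and added, replacing A's left-to-right indexed while loop and its special-case seeding from arr[0].
import Mathlib
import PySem

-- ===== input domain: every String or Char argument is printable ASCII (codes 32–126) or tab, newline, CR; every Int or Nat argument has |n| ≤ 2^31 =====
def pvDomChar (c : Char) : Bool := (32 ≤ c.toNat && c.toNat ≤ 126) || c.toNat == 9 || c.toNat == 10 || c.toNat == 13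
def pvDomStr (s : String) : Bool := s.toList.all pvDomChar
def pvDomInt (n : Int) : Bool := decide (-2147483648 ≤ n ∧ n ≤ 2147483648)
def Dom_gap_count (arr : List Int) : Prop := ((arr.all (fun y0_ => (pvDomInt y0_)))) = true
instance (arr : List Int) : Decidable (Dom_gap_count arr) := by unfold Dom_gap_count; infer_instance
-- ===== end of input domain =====

-- B counts the 1- and 3-gaps of the explicit chain (outlet 0, the adapters, last+3) by divide and conquer
-- instead of A's left-to-right indexed while loop; an alternative decomposition of the same O(n) task.

-- ===== PORT A =====
-- literal transliteration of A: the arr[0] branch seeds the counters, then the index-based while loop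
def gap_count (arr : List Int) : Int :=
  let s0 : Int × Int :=
    if PySem.List.pyGetD arr 0 0 = 1 then (0 + 1, 1)
    else if PySem.List.pyGetD arr 0 0 = 3 then (0, 1 + 1)
    else (0, 1)
  let s1 : Int × Int :=
    (PySem.List.pyRange 0 (PySem.List.len arr - 1) 1).foldl
      (fun s i =>
        if PySem.List.pyGetD arr i 0 + 1 = PySem.List.pyGetD arr (i + 1) 0 then (s.1 + 1, s.2)
        else if PySem.List.pyGetD arr i 0 + 3 = PySem.List.pyGetD arr (i + 1) 0 then (s.1, s.2 + 1)
        else s) s0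
  s1.1 * s1.2

-- ===== PORT B =====
-- _gaps(chain, lo, hi): the indices lo, hi are always nonnegative (list positions), so Python's
-- `(lo+hi)//2` is exactly Nat division here; the `hi ≤ lo` guard matches Python's `hi == lo` on
-- every reachable call (the recursion keeps lo < mid < hi); the fuel argument (seeded with the
-- chain length, always ≥ hi - lo, which strictly decreases) only makes the recursion structural.
def gapsDC (chain : List Int) (fuel lo hi : Nat) : Int × Int :=
  match fuel with
  | 0 => (0, 0)
  | f + 1 =>
    if hi - lo = 1 then
      ((if chain.getD hi 0 - chain.getD lo 0 = 1 then 1 else 0),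
       (if chain.getD hi 0 - chain.getD lo 0 = 3 then 1 else 0))
    else if hi ≤ lo then (0, 0)
    else
      let mid := (lo + hi) / 2
      let p1 := gapsDC chain f lo mid
      let p2 := gapsDC chain f mid hi
      (p1.1 + p2.1, p1.2 + p2.2)

def gap_count_alt (arr : List Int) : Int :=
  let chain : List Int := [0] ++ arr ++ [PySem.List.pyGetD arr (-1) 0 + 3]
  let p := gapsDC chain chain.length 0 (chain.length - 1)
  p.1 * p.2

-- ===== PRECONDITION & SPEC =====
-- A raises IndexError on the empty list (its first-element access); B's Python raises there too (its last-element access).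
def Pre_gap_count (arr : List Int) : Prop := arr ≠ []
instance (arr : List Int) : Decidable (Pre_gap_count arr) := by unfold Pre_gap_count; infer_instance
def pvWitness_gap_count : List Int := [1, 4, 5, 6, 9]

def Spec_gap_count (arr : List Int) (out : Int) : Prop := out = gap_count_alt arr
instance (arr : List Int) (out : Int) : Decidable (Spec_gap_count arr out) := by unfold Spec_gap_count; infer_instance

-- ===== CLAIM (what is proved, stated in full; the proofs are below) =====
def Claim_equal_gap_count : Prop := ∀ (arr : List Int), Dom_gap_count arr → Pre_gap_count arr → Spec_gap_count arr (gap_count arr)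

-- ===== LEMMAS AND PROOFS =====
def pairDiffs (l : List Int) : List Int := (l.zip l.tail).map (fun p => p.2 - p.1)

-- number of adjacent k-gaps strictly inside positions [lo, hi) of chain
def cntK (chain : List Int) (k : Int) (lo hi : Nat) : Int :=
  ((List.range' lo (hi - lo)).countP
    (fun i => decide (chain.getD (i + 1) 0 - chain.getD i 0 = k)) : Int)

theorem pairDiffs_cons_cons (a b : Int) (t : List Int) :
    pairDiffs (a :: b :: t) = (b - a) :: pairDiffs (b :: t) := by
  simp [pairDiffs]

theorem cntK_split (chain : List Int) (k : Int) (lo mid hi : Nat)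
    (h1 : lo ≤ mid) (h2 : mid ≤ hi) :
    cntK chain k lo hi = cntK chain k lo mid + cntK chain k mid hi := by
  unfold cntK
  have hap := (List.range'_append (s := lo) (m := mid - lo) (n := hi - mid) (step := 1)).symm
  rw [show lo + 1 * (mid - lo) = mid by omega] at hap
  rw [show hi - lo = (mid - lo) + (hi - mid) by omega, hap, List.countP_append]
  push_cast
  ring

theorem gapsDC_eq_cntK (chain : List Int) (fuel lo hi : Nat) (hf : hi - lo ≤ fuel) :
    gapsDC chain fuel lo hi = (cntK chain 1 lo hi, cntK chain 3 lo hi) := by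
  induction fuel generalizing lo hi with
  | zero =>
    have h0 : hi - lo = 0 := by omega
    simp [gapsDC, cntK, h0]
  | succ f ih =>
    rw [gapsDC]
    by_cases h1 : hi - lo = 1
    · rw [if_pos h1]
      have hhi : hi = lo + 1 := by omega
      subst hhi
      simp [cntK]
    · rw [if_neg h1]
      by_cases h2 : hi ≤ lo
      · rw [if_pos h2]
        have h0 : hi - lo = 0 := by omega
        simp [cntK, h0]
      · rw [if_neg h2]
        have hlo : lo ≤ (lo + hi) / 2 := by omega
        have hhi : (lo + hi) / 2 ≤ hi := by omega
        show ((gapsDC chain f lo ((lo + hi) / 2)).1 + (gapsDC chain f ((lo + hi) / 2) hi).1,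
              (gapsDC chain f lo ((lo + hi) / 2)).2 + (gapsDC chain f ((lo + hi) / 2) hi).2)
            = (cntK chain 1 lo hi, cntK chain 3 lo hi)
        rw [ih lo ((lo + hi) / 2) (by omega), ih ((lo + hi) / 2) hi (by omega),
            cntK_split chain 1 lo ((lo + hi) / 2) hi hlo hhi,
            cntK_split chain 3 lo ((lo + hi) / 2) hi hlo hhi]

-- shift: counting over positions [1, len) of a::rest = counting over [0, len-1) of rest
theorem cntK_shift (a : Int) (rest : List Int) (k : Int) (n : Nat) :
    ((List.range' 1 n).countP
      (fun i => decide ((a :: rest).getD (i + 1) 0 - (a :: rest).getD i 0 = k)))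
    = ((List.range' 0 n).countP
      (fun i => decide (rest.getD (i + 1) 0 - rest.getD i 0 = k))) := by
  rw [List.range'_eq_map_range, List.range'_eq_map_range, List.countP_map, List.countP_map]
  apply List.countP_congr
  intro i _
  simp [Function.comp, Nat.add_comm 1 i]

theorem cntK_eq_pairDiffs_count (chain : List Int) (k : Int) :
    cntK chain k 0 (chain.length - 1) = ((pairDiffs chain).count k : Int) := by
  induction chain with
  | nil => simp [cntK, pairDiffs]
  | cons a t ih =>
    cases t with
    | nil => simp [cntK, pairDiffs]
    | cons b t' =>
      have hlen : (a :: b :: t').length - 1 = (b :: t').length - 1 + 1 := by simp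
      unfold cntK at ih ⊢
      rw [hlen]
      simp only [Nat.sub_zero]
      rw [List.range'_succ]
      simp only [List.countP_cons]
      rw [cntK_shift a (b :: t') k ((b :: t').length - 1)]
      rw [pairDiffs_cons_cons, List.count_cons]
      simp only [List.getD_cons_zero, List.getD_cons_succ, beq_iff_eq] at *
      rw [Nat.sub_zero] at ih
      push_cast [← ih]
      split_ifs <;> simp_all

theorem loopA (arr : List Int) (s : Int × Int) :
    (List.range (arr.length - 1)).foldl
      (fun s n =>
        if arr.getD n 0 + 1 = arr.getD (n + 1) 0 then (s.1 + 1, s.2)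
        else if arr.getD n 0 + 3 = arr.getD (n + 1) 0 then (s.1, s.2 + 1)
        else s) s
    = (s.1 + (pairDiffs arr).count 1, s.2 + (pairDiffs arr).count 3) := by
  induction arr generalizing s with
  | nil => simp [pairDiffs]
  | cons a t ih =>
    cases t with
    | nil => simp [pairDiffs]
    | cons b t' =>
      have hlen : (a :: b :: t').length - 1 = (b :: t').length - 1 + 1 := by simp
      rw [hlen, List.range_succ_eq_map, List.foldl_cons, List.foldl_map]
      have hshift : ∀ init : Int × Int,
        List.foldl (fun (x : Int × Int) (y : Nat) =>
            if (a :: b :: t').getD (y+1) 0 + 1 = (a :: b :: t').getD (y+1+1) 0 then (x.1+1, x.2)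
            else if (a :: b :: t').getD (y+1) 0 + 3 = (a :: b :: t').getD (y+1+1) 0 then (x.1, x.2+1) else x)
          init (List.range ((b :: t').length - 1))
        = List.foldl (fun (x : Int × Int) (y : Nat) =>
            if (b :: t').getD y 0 + 1 = (b :: t').getD (y+1) 0 then (x.1+1, x.2)
            else if (b :: t').getD y 0 + 3 = (b :: t').getD (y+1) 0 then (x.1, x.2+1) else x)
          init (List.range ((b :: t').length - 1)) := by
        intro init
        apply PySem.List.foldl_congr_mem
        intro x y _
        simp
      rw [hshift]
      rw [ih]
      simp only [List.getD_cons_zero, List.getD_cons_succ, pairDiffs_cons_cons,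
        List.count_cons, beq_iff_eq, Prod.mk.injEq]
      split_ifs <;> push_cast <;> constructor <;> omega

theorem pairDiffs_append_last (arr : List Int) (h : arr ≠ []) (v : Int) :
    pairDiffs (arr ++ [v]) = pairDiffs arr ++ [v - arr.getLast h] := by
  induction arr with
  | nil => exact absurd rfl h
  | cons a t ih =>
    cases t with
    | nil => simp [pairDiffs]
    | cons b t' =>
      have := ih (by simp)
      simp only [List.cons_append, pairDiffs_cons_cons] at *
      simp [this, List.getLast_cons]

-- bridge A's pyRange/pyGetD loop to the List.range/getD loop of loopA and finish
theorem gap_count_closed (a : Int) (t : List Int) :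
    gap_count (a :: t) =
      ((if a = 1 then (1 : Int) else 0) + ((pairDiffs (a :: t)).count 1 : Int)) *
      ((1 : Int) + (if a = 3 then (1 : Int) else 0) + ((pairDiffs (a :: t)).count 3 : Int)) := by
  unfold gap_count
  have hlen : PySem.List.len (a :: t) - 1 = ((t.length : Nat) : Int) := by
    simp [PySem.List.len_eq]
  rw [hlen, PySem.List.pyRange_zero_natCast]
  simp only [List.foldl_map, PySem.List.pyGetD_zero_cons]
  have hbody : ∀ init : Int × Int,
      (List.range t.length).foldl
        (fun (s : Int × Int) (n : Nat) =>
          if PySem.List.pyGetD (a :: t) (n : Int) 0 + 1 = PySem.List.pyGetD (a :: t) ((n : Int) + 1) 0 then (s.1 + 1, s.2)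
          else if PySem.List.pyGetD (a :: t) (n : Int) 0 + 3 = PySem.List.pyGetD (a :: t) ((n : Int) + 1) 0 then (s.1, s.2 + 1)
          else s) init
      = (List.range t.length).foldl
        (fun (s : Int × Int) (n : Nat) =>
          if (a :: t).getD n 0 + 1 = (a :: t).getD (n + 1) 0 then (s.1 + 1, s.2)
          else if (a :: t).getD n 0 + 3 = (a :: t).getD (n + 1) 0 then (s.1, s.2 + 1)
          else s) init := by
    intro init
    apply PySem.List.foldl_congr_mem
    intro s' n _
    have e0 : PySem.List.pyGetD (a :: t) ((n : Int)) 0 = (a :: t).getD n 0 := by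
      rw [PySem.List.pyGetD_natCast]
    have e1 : PySem.List.pyGetD (a :: t) ((n : Int) + 1) 0 = (a :: t).getD (n + 1) 0 := by
      rw [show ((n : Int) + 1) = (((n + 1 : Nat) : Int)) by push_cast; ring,
        PySem.List.pyGetD_natCast]
    rw [e0, e1]
  simp only [hbody]
  have hlen2 : t.length = (a :: t).length - 1 := by simp
  rw [hlen2, loopA]
  split_ifs <;> push_cast <;> first | (exfalso; omega) | ring

theorem gap_count_alt_closed (a : Int) (t : List Int) :
    gap_count_alt (a :: t) =
      ((if a = 1 then (1 : Int) else 0) + ((pairDiffs (a :: t)).count 1 : Int)) *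
      ((1 : Int) + (if a = 3 then (1 : Int) else 0) + ((pairDiffs (a :: t)).count 3 : Int)) := by
  unfold gap_count_alt
  rw [PySem.List.pyGetD_neg_one (a :: t) 0 (by simp)]
  have key : ∀ (c : List Int),
      gapsDC c c.length 0 (c.length - 1)
        = (((pairDiffs c).count 1 : Int), ((pairDiffs c).count 3 : Int)) := by
    intro c
    rw [gapsDC_eq_cntK c c.length 0 (c.length - 1) (by omega),
        cntK_eq_pairDiffs_count, cntK_eq_pairDiffs_count]
  simp only [key]
  have hpd : pairDiffs ([0] ++ (a :: t) ++ [(a :: t).getLast (by simp) + 3])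
      = (a - 0) :: (pairDiffs (a :: t) ++ [3]) := by
    rw [show ([0] ++ (a :: t) ++ [(a :: t).getLast (by simp) + 3] : List Int)
        = (0 : Int) :: a :: (t ++ [(a :: t).getLast (by simp) + 3]) by simp,
      pairDiffs_cons_cons,
      show (a :: (t ++ [(a :: t).getLast (by simp) + 3]) : List Int)
        = (a :: t) ++ [(a :: t).getLast (by simp) + 3] by simp,
      pairDiffs_append_last (a :: t) (by simp)]
    norm_num
  rw [hpd]
  simp only [List.count_cons, List.count_append, List.count_nil, beq_iff_eq]
  split_ifs <;> push_cast <;> first | (exfalso; omega) | ring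

-- ===== VERDICT (by name: the statement is the Claim_ definition above) =====
theorem gap_count_spec : Claim_equal_gap_count := by
  intro arr _ hpre
  cases arr with
  | nil => exact absurd rfl hpre
  | cons a t =>
    unfold Spec_gap_count
    rw [gap_count_closed, gap_count_alt_closed]
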